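-- pv_equiv track=rewrite | github.com/rbirr/experiment-backtrack-algorithms | main.py | check_vector
-- ===== SOURCE A (Python) =====
-- def check_vector(vector):
--     existing_values = []
--     for i in vector:
--         if i not in existing_values:
--             existing_values.append(i)
--         else:
--             if i != 0: # 0 is a value not entered
--                 return 0
--     return 1
-- ===== SOURCE B (Python) =====
-- def check_vector(vector):
--     counts = {}
--     for v in vector:
--         counts[v] = counts.get(v, 0) + 1
--     for value, count in counts.items():
--         if value != 0 and count > 1:
--             return 0
--     return 1
-- ===== Notes on version B (the rewrite author's own statement) =====
-- stated objective: alternative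
-- what changed: A's single scan keeps a growing 'seen' list with an O(n) membership test and returns 0 mid-scan at the second occurrence of a non-zero value; B first builds a frequency table in one pass and then scans the distinct (value, count) items for a non-zero value with count > 1.
import Mathlib
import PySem

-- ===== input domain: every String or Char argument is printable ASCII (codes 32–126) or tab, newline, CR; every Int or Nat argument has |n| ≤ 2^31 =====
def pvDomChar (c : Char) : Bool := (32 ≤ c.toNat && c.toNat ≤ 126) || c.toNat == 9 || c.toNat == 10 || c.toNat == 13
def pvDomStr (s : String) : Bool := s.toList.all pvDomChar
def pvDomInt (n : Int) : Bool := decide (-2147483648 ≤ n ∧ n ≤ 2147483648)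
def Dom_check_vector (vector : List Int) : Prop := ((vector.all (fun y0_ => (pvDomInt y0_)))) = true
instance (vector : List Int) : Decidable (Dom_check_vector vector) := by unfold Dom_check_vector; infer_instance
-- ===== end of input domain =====

-- B replaces A's seen-list scan (early return on the second non-zero occurrence) by
-- building a frequency table first and then scanning its distinct (value, count) items.

-- ===== PORT A =====
-- the 'for i in vector' loop carrying existing_values; early 'return 0' = the 0 branch
def checkVectorLoop (existing : List Int) : List Int → Int
  | [] => 1
  | i :: rest =>
      if existing.contains i then
        (if i ≠ 0 then 0 else checkVectorLoop existing rest)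
      else
        checkVectorLoop (existing ++ [i]) rest

def check_vector (vector : List Int) : Int := checkVectorLoop [] vector

-- ===== PORT B =====
-- the 'for value, count in counts.items()' loop with early return
def checkItemsLoop : List (Int × Int) → Int
  | [] => 1
  | p :: rest => if p.1 ≠ 0 ∧ 1 < p.2 then 0 else checkItemsLoop rest

def check_vector_alt (vector : List Int) : Int :=
  let counts := vector.foldl (fun d x => d.insert x (d.getD x 0 + 1)) PySem.Dict.empty
  checkItemsLoop counts.items

-- ===== PRECONDITION & SPEC =====
def Spec_check_vector (vector : List Int) (out : Int) : Prop := out = check_vector_alt vector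
instance (vector : List Int) (out : Int) : Decidable (Spec_check_vector vector out) := by unfold Spec_check_vector; infer_instance

-- ===== CLAIM (what is proved, stated in full; the proofs are below) =====
def Claim_equal_check_vector : Prop := ∀ (vector : List Int), Dom_check_vector vector → Spec_check_vector vector (check_vector vector)

-- ===== LEMMAS AND PROOFS =====

lemma checkVectorLoop_eq (l seen : List Int) :
    checkVectorLoop seen l
      = if (∃ i ∈ l, i ≠ 0 ∧ (i ∈ seen ∨ 2 ≤ l.count i)) then 0 else 1 := by
  induction l generalizing seen with
  | nil => simp [checkVectorLoop]
  | cons i rest ih =>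
    by_cases hc : i ∈ seen
    · by_cases hz : i = 0
      · subst hz
        rw [checkVectorLoop, if_pos (by simpa using hc), if_neg (by simp), ih]
        congr 1
        apply propext
        constructor
        · rintro ⟨j, hj, hjz, hcase⟩
          refine ⟨j, List.mem_cons_of_mem _ hj, hjz, ?_⟩
          rcases hcase with h | h
          · exact Or.inl h
          · exact Or.inr (le_trans h (List.count_le_count_cons ..))
        · rintro ⟨j, hj, hjz, hcase⟩
          have hji : j ≠ (0 : Int) := hjz
          rcases List.mem_cons.mp hj with rfl | hj'
          · exact absurd rfl hjz
          · refine ⟨j, hj', hjz, ?_⟩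
            rcases hcase with h | h
            · exact Or.inl h
            · right
              rwa [List.count_cons_of_ne (Ne.symm hji)] at h
      · rw [checkVectorLoop, if_pos (by simpa using hc), if_pos hz,
          if_pos ⟨i, List.mem_cons_self, hz, Or.inl hc⟩]
    · rw [checkVectorLoop, if_neg (by simpa using hc), ih]
      congr 1
      apply propext
      constructor
      · rintro ⟨j, hj, hjz, hcase⟩
        rcases hcase with h | h
        · rcases List.mem_append.mp h with h' | h'
          · exact ⟨j, List.mem_cons_of_mem _ hj, hjz, Or.inl h'⟩
          · have : j = i := by simpa using h'
            subst this
            refine ⟨j, List.mem_cons_self, hjz, Or.inr ?_⟩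
            rw [List.count_cons_self]
            have : 1 ≤ rest.count j := List.count_pos_iff.mpr hj
            omega
        · refine ⟨j, List.mem_cons_of_mem _ hj, hjz, Or.inr ?_⟩
          exact le_trans h (List.count_le_count_cons ..)
      · rintro ⟨j, hj, hjz, hcase⟩
        rcases List.mem_cons.mp hj with rfl | hj'
        · rcases hcase with h | h
          · exact absurd h hc
          · rw [List.count_cons_self] at h
            have hmem : j ∈ rest := List.count_pos_iff.mp (by omega)
            exact ⟨j, hmem, hjz, Or.inl (by simp)⟩
        · rcases hcase with h | h
          · exact ⟨j, hj', hjz, Or.inl (List.mem_append_left _ h)⟩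
          · by_cases hji : j = i
            · subst hji
              rw [List.count_cons_self] at h
              have hmem : j ∈ rest := List.count_pos_iff.mp (by omega)
              exact ⟨j, hmem, hjz, Or.inl (by simp)⟩
            · rw [List.count_cons_of_ne (Ne.symm hji)] at h
              exact ⟨j, hj', hjz, Or.inr h⟩

lemma checkItemsLoop_eq (items : List (Int × Int)) :
    checkItemsLoop items = if (∃ p ∈ items, p.1 ≠ 0 ∧ 1 < p.2) then 0 else 1 := by
  induction items with
  | nil => simp [checkItemsLoop]
  | cons p rest ih =>
    rw [checkItemsLoop, ih]
    by_cases hp : p.1 ≠ 0 ∧ 1 < p.2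
    · rw [if_pos hp, if_pos ⟨p, List.mem_cons_self, hp⟩]
    · rw [if_neg hp]
      congr 1
      apply propext
      constructor
      · rintro ⟨q, hq, hqc⟩; exact ⟨q, List.mem_cons_of_mem _ hq, hqc⟩
      · rintro ⟨q, hq, hqc⟩
        rcases List.mem_cons.mp hq with rfl | hq'
        · exact absurd hqc hp
        · exact ⟨q, hq', hqc⟩

lemma check_vector_alt_eq (vector : List Int) :
    check_vector_alt vector
      = if (∃ i ∈ vector, i ≠ 0 ∧ 2 ≤ vector.count i) then 0 else 1 := by
  rw [check_vector_alt]
  rw [PySem.Dict.foldl_insert_getD_add_one_eq_counter, PySem.Dict.items_counter,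
    checkItemsLoop_eq]
  congr 1
  apply propext
  constructor
  · rintro ⟨p, hp, hne, hlt⟩
    rcases List.mem_map.mp hp with ⟨k, hk, rfl⟩
    refine ⟨k, (PySem.Set.mem_ofList _ _).mp hk, hne, ?_⟩
    simp only at hlt
    exact_mod_cast hlt
  · rintro ⟨i, hi, hne, hcnt⟩
    refine ⟨(i, (vector.count i : Int)), List.mem_map.mpr
      ⟨i, (PySem.Set.mem_ofList _ _).mpr hi, rfl⟩, hne, ?_⟩
    show (1:Int) < (vector.count i : Int)
    exact_mod_cast hcnt

-- ===== VERDICT (by name: the statement is the Claim_ definition above) =====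
theorem check_vector_spec : Claim_equal_check_vector := by
  intro vector _
  unfold Spec_check_vector check_vector
  rw [checkVectorLoop_eq, check_vector_alt_eq]
  simp
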